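-- pv_equiv track=rewrite | github.com/selfreferencing/erdos-86-lean | verify_certificate.py | verify_prime
-- ===== SOURCE A (Python) =====
-- from math import gcd
--
-- K_COMPLETE = [0, 1, 2, 3, 4, 5, 6, 7, 9, 11, 13, 14, 16, 17, 19, 21, 23, 25, 26, 29, 31, 39, 41]
--
-- def factor(n):
--     if n <= 1:
--         return []
--     factors = []
--     d = 2
--     while d * d <= n:
--         if n % d == 0:
--             e = 0
--             while n % d == 0:
--                 e += 1
--                 n //= d
--             factors.append((d, e))
--         d += 1 if d == 2 else 2
--     if n > 1:
--         factors.append((n, 1))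
--     return factors
--
-- def divisors_of_square(n):
--     facts = factor(n)
--     divs = [1]
--     for p, e in facts:
--         new_divs = []
--         for d in divs:
--             power = 1
--             for i in range(2*e + 1):
--                 new_divs.append(d * power)
--                 power *= p
--         divs = new_divs
--     return sorted(divs)
--
-- def find_witness(p, k):
--     """Find a Type II witness d for p at k."""
--     m_k = 4 * k + 3
--     if (p + m_k) % 4 != 0:
--         return None
--     x_k = (p + m_k) // 4
--     if gcd(x_k, m_k) > 1:
--         return None
--     target = (-x_k) % m_k
--     divs = divisors_of_square(x_k)
--     for d in divs:
--         if d % m_k == target: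
--             return (k, d, x_k, m_k)
--     return None
--
-- def verify_prime(p):
--     """Verify p is covered by K_COMPLETE and report the certificate path."""
--     r = p % 840
--     s = p % 11
--     t = p % 23
--
--     resistant = [1, 121, 169, 289, 361, 529]
--
--     # Find which k covers this prime
--     for k in K_COMPLETE:
--         result = find_witness(p, k)
--         if result:
--             k_used, d, x_k, m_k = result
--
--             if r not in resistant:
--                 level = 1
--             elif s in [7, 8, 10] or (s in [2, 6] and r != 361):
--                 level = 2
--             else:
--                 level = 3
--
--             return {
--                 'p': p,
--                 'r': r,
--                 's': s,
--                 't': t,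
--                 'level': level,
--                 'k': k_used,
--                 'd': d,
--                 'm_k': m_k,
--                 'x_k': x_k
--             }
--
--     return None  # Should never happen
-- ===== SOURCE B (Python) =====
-- from math import gcd, isqrt
--
-- K_COMPLETE = [0, 1, 2, 3, 4, 5, 6, 7, 9, 11, 13, 14, 16, 17, 19, 21, 23, 25, 26, 29, 31, 39, 41]
--
-- def _divisors(n):
--     """All positive divisors of n >= 1, by trial division up to isqrt(n)."""
--     small, large = [], []
--     for i in range(1, isqrt(n) + 1):
--         if n % i == 0:
--             small.append(i)
--             large.append(n // i)
--     return small + large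
--
-- def _witness(p, k):
--     """Type II witness for p at k: smallest divisor d of x_k**2 with d % m_k == target.
--     Every divisor of x*x is a product of two divisors of x, so scan those products."""
--     m = 4 * k + 3
--     if (p + m) % 4:
--         return None
--     x = (p + m) // 4
--     if gcd(x, m) != 1:
--         return None
--     t = (-x) % m
--     dx = _divisors(x)
--     best = None
--     for a in dx:
--         for b in dx:
--             d = a * b
--             if d % m == t and (best is None or d < best):
--                 best = d
--     if best is None:
--         return None
--     return (k, best, x, m)
--
-- def _level(r, s):
--     if r not in (1, 121, 169, 289, 361, 529):
--         return 1
--     if s in (7, 8, 10) or (s in (2, 6) and r != 361):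
--         return 2
--     return 3
--
-- def verify_prime(p):
--     """Verify p is covered by K_COMPLETE and report the certificate path."""
--     r, s, t = p % 840, p % 11, p % 23
--     for k in K_COMPLETE:
--         w = _witness(p, k)
--         if w is not None:
--             k_used, d, x_k, m_k = w
--             return {'p': p, 'r': r, 's': s, 't': t, 'level': _level(r, s),
--                     'k': k_used, 'd': d, 'm_k': m_k, 'x_k': x_k}
--     return None
-- ===== Notes on version B (the rewrite author's own statement) =====
-- stated objective: alternative
-- what changed: The witness search no longer factors x_k into prime powers, expands all prime-power products and sorts them: B enumerates the divisors of x_k by trial division up to isqrt(x_k) and takes a running minimum over pairwise products of two divisors (every divisor of x_k^2 is such a product), so factor/divisors_of_square/sorted disappear.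
-- outside the precondition, e.g. on verify_prime(-2183): A returns None, B raises ValueError
import Mathlib
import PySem

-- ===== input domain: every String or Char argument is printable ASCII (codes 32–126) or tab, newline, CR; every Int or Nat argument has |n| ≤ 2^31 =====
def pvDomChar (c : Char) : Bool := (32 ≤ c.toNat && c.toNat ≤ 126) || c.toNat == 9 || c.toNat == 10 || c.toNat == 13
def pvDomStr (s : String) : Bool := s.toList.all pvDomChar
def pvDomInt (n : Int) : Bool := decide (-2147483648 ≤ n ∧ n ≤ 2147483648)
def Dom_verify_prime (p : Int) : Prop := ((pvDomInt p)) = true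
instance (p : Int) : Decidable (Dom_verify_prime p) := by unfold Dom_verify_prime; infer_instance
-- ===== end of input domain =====

-- B is an alternative of similar cost: it keeps the outer loop but replaces A's
-- factorization-based divisor enumeration and sort by trial division plus a running minimum.

-- ===== PORT A =====
def K_COMPLETE : List Int := [0, 1, 2, 3, 4, 5, 6, 7, 9, 11, 13, 14, 16, 17, 19, 21, 23, 25, 26, 29, 31, 39, 41]

-- inner 'while n % d == 0' of factor (fuel makes it total; fuel n.toNat suffices)
def factorInner (fuel : Nat) (n d e : Int) : Int × Int :=
  match fuel with
  | 0 => (n, e)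
  | f + 1 =>
    if PySem.Int.mod n d = 0 then factorInner f (PySem.Int.floordiv n d) d (e + 1)
    else (n, e)

-- outer 'while d * d <= n' of factor
def factorLoop (fuel : Nat) (n d : Int) (acc : List (Int × Int)) : Int × List (Int × Int) :=
  match fuel with
  | 0 => (n, acc)
  | f + 1 =>
    if d * d ≤ n then
      if PySem.Int.mod n d = 0 then
        let r := factorInner n.toNat n d 0
        factorLoop f r.1 (d + (if d = 2 then 1 else 2)) (acc ++ [(d, r.2)])
      else
        factorLoop f n (d + (if d = 2 then 1 else 2)) acc
    else (n, acc)

def factor (n : Int) : List (Int × Int) :=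
  if n ≤ 1 then []
  else
    let r := factorLoop (n.toNat + 1) n 2 []
    if r.1 > 1 then r.2 ++ [(r.1, 1)] else r.2

-- 'power = 1; for i in range(2*e+1): new_divs.append(d * power); power *= p'
def dsqExpand (p e : Int) (nd : List Int) (d : Int) : List Int :=
  ((PySem.List.pyRange 0 (2 * e + 1) 1).foldl
    (fun (st : List Int × Int) _ => (st.1 ++ [d * st.2], st.2 * p)) (nd, (1 : Int))).1

def divisors_of_square (n : Int) : List Int :=
  let facts := factor n
  let divs := facts.foldl (fun divs pe => divs.foldl (dsqExpand pe.1 pe.2) []) [1]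
  PySem.List.sorted divs (fun x => x) false

-- 'for d in divs: if d % m_k == target: return …'
def fwScan (m t : Int) : List Int → Option Int
  | [] => none
  | d :: ds => if PySem.Int.mod d m = t then some d else fwScan m t ds

def find_witness (p k : Int) : Option (Int × Int × Int × Int) :=
  let m := 4 * k + 3
  if PySem.Int.mod (p + m) 4 ≠ 0 then none
  else
    let x := PySem.Int.floordiv (p + m) 4
    if (Int.gcd x m : Int) > 1 then none
    else
      let t := PySem.Int.mod (-x) m
      match fwScan m t (divisors_of_square x) with
      | some d => some (k, d, x, m)
      | none => none

def resistant : List Int := [1, 121, 169, 289, 361, 529]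

def vpLoop (p r s t : Int) : List Int → Option (List (String × Int))
  | [] => none
  | k :: ks =>
    match find_witness p k with
    | some (k_used, d, x_k, m_k) =>
      let level : Int :=
        if ¬ (r ∈ resistant) then 1
        else if s ∈ ([7, 8, 10] : List Int) ∨ (s ∈ ([2, 6] : List Int) ∧ r ≠ 361) then 2
        else 3
      some [("p", p), ("r", r), ("s", s), ("t", t), ("level", level),
            ("k", k_used), ("d", d), ("m_k", m_k), ("x_k", x_k)]
    | none => vpLoop p r s t ks

def verify_prime (p : Int) : Option (List (String × Int)) :=
  vpLoop p (PySem.Int.mod p 840) (PySem.Int.mod p 11) (PySem.Int.mod p 23) K_COMPLETE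

-- ===== PORT B =====
-- trial division up to isqrt(n): two accumulators 'small' and 'large'
def bDivisors (n : Int) : List Int :=
  let sl := (PySem.List.pyRange 1 ((Nat.sqrt n.toNat : Int) + 1) 1).foldl
    (fun (st : List Int × List Int) i =>
      if PySem.Int.mod n i = 0 then (st.1 ++ [i], st.2 ++ [PySem.Int.floordiv n i]) else st)
    ([], [])
  sl.1 ++ sl.2

-- 'if d % m == t and (best is None or d < best): best = d'
def bStep (m t : Int) (best : Option Int) (d : Int) : Option Int :=
  if PySem.Int.mod d m = t then
    match best with
    | none => some d
    | some v => if d < v then some d else best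
  else best

def bBest (m t : Int) (dx : List Int) : Option Int :=
  dx.foldl (fun best a => dx.foldl (fun best b => bStep m t best (a * b)) best) none

def bWitness (p k : Int) : Option (Int × Int × Int × Int) :=
  let m := 4 * k + 3
  if PySem.Int.mod (p + m) 4 ≠ 0 then none
  else
    let x := PySem.Int.floordiv (p + m) 4
    if (Int.gcd x m : Int) ≠ 1 then none
    else
      let t := PySem.Int.mod (-x) m
      match bBest m t (bDivisors x) with
      | some d => some (k, d, x, m)
      | none => none

def bLevel (r s : Int) : Int :=
  if ¬ (r ∈ ([1, 121, 169, 289, 361, 529] : List Int)) then 1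
  else if s ∈ ([7, 8, 10] : List Int) ∨ (s ∈ ([2, 6] : List Int) ∧ r ≠ 361) then 2
  else 3

def bLoop (p r s t : Int) : List Int → Option (List (String × Int))
  | [] => none
  | k :: ks =>
    match bWitness p k with
    | some (k_used, d, x_k, m_k) =>
      some [("p", p), ("r", r), ("s", s), ("t", t), ("level", bLevel r s),
            ("k", k_used), ("d", d), ("m_k", m_k), ("x_k", x_k)]
    | none => bLoop p r s t ks

def verify_prime_alt (p : Int) : Option (List (String × Int)) :=
  bLoop p (PySem.Int.mod p 840) (PySem.Int.mod p 11) (PySem.Int.mod p 23) K_COMPLETE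

-- ===== PRECONDITION & SPEC =====
-- Pre_ excludes p < -3 with p ≡ 1 (mod 4): there x_k is negative, so A's factor()
-- accidentally returns [] and A reports the degenerate divisor d = 1, while B's
-- natural divisor enumeration raises ValueError (math.isqrt of a negative number).
def Pre_verify_prime (p : Int) : Prop := -3 ≤ p ∨ PySem.Int.mod p 4 ≠ 1
instance (p : Int) : Decidable (Pre_verify_prime p) := by unfold Pre_verify_prime; infer_instance
def pvWitness_verify_prime : Int := 5

def Spec_verify_prime (p : Int) (out : Option (List (String × Int))) : Prop := out = verify_prime_alt p
instance (p : Int) (out : Option (List (String × Int))) : Decidable (Spec_verify_prime p out) := by unfold Spec_verify_prime; infer_instance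

-- ===== CLAIM (what is proved, stated in full; the proofs are below) =====
def Claim_equal_verify_prime : Prop := ∀ (p : Int), Dom_verify_prime p → Pre_verify_prime p → Spec_verify_prime p (verify_prime p)
-- ===== LEMMAS AND PROOFS =====

-- ---- generic characterisations: A's first match in a sorted list, B's running minimum ----

lemma fwScan_eq_none {m t : Int} {l : List Int} :
    fwScan m t l = none ↔ ∀ w ∈ l, PySem.Int.mod w m ≠ t := by
  induction l with
  | nil => simp [fwScan]
  | cons d ds ih =>
    by_cases h : PySem.Int.mod d m = t <;> simp [fwScan, h, ih]

lemma fwScan_eq_some {m t : Int} {l : List Int} {v : Int}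
    (hs : l.Pairwise (· ≤ ·)) (h : fwScan m t l = some v) :
    v ∈ l ∧ PySem.Int.mod v m = t ∧ ∀ w ∈ l, PySem.Int.mod w m = t → v ≤ w := by
  induction l with
  | nil => simp [fwScan] at h
  | cons d ds ih =>
    rcases List.pairwise_cons.1 hs with ⟨hd, hds⟩
    by_cases hP : PySem.Int.mod d m = t
    · simp only [fwScan, if_pos hP, Option.some.injEq] at h
      subst h
      refine ⟨List.mem_cons_self, hP, ?_⟩
      intro w hw _
      rcases List.mem_cons.1 hw with rfl | hw
      · exact le_refl _
      · exact hd _ hw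
    · simp only [fwScan, if_neg hP] at h
      obtain ⟨h1, h2, h3⟩ := ih hds h
      refine ⟨List.mem_cons_of_mem _ h1, h2, ?_⟩
      intro w hw hPw
      rcases List.mem_cons.1 hw with rfl | hw
      · exact absurd hPw hP
      · exact h3 w hw hPw

lemma bFold_some {m t : Int} (c : List Int) (v : Int) :
    ∃ w, c.foldl (bStep m t) (some v) = some w ∧ w ≤ v ∧
      (w = v ∨ (w ∈ c ∧ PySem.Int.mod w m = t)) ∧
      (∀ u ∈ c, PySem.Int.mod u m = t → w ≤ u) := by
  induction c generalizing v with
  | nil => exact ⟨v, rfl, le_refl _, Or.inl rfl, by simp⟩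
  | cons d ds ih =>
    by_cases hP : PySem.Int.mod d m = t
    · by_cases hlt : d < v
      · obtain ⟨w, hw, hwv, hwc, hmin⟩ := ih d
        refine ⟨w, ?_, by omega, ?_, ?_⟩
        · simpa [bStep, hP, hlt] using hw
        · rcases hwc with rfl | ⟨hc, hPw⟩
          · exact Or.inr ⟨List.mem_cons_self, hP⟩
          · exact Or.inr ⟨List.mem_cons_of_mem _ hc, hPw⟩
        · intro u hu hPu
          rcases List.mem_cons.1 hu with rfl | hu
          · exact hwv
          · exact hmin u hu hPu
      · obtain ⟨w, hw, hwv, hwc, hmin⟩ := ih v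
        refine ⟨w, ?_, hwv, ?_, ?_⟩
        · simpa [bStep, hP, hlt] using hw
        · rcases hwc with rfl | ⟨hc, hPw⟩
          · exact Or.inl rfl
          · exact Or.inr ⟨List.mem_cons_of_mem _ hc, hPw⟩
        · intro u hu hPu
          rcases List.mem_cons.1 hu with rfl | hu
          · omega
          · exact hmin u hu hPu
    · obtain ⟨w, hw, hwv, hwc, hmin⟩ := ih v
      refine ⟨w, ?_, hwv, ?_, ?_⟩
      · simpa [bStep, hP] using hw
      · rcases hwc with rfl | ⟨hc, hPw⟩
        · exact Or.inl rfl
        · exact Or.inr ⟨List.mem_cons_of_mem _ hc, hPw⟩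
      · intro u hu hPu
        rcases List.mem_cons.1 hu with rfl | hu
        · exact absurd hPu hP
        · exact hmin u hu hPu

lemma bFold_none_iff {m t : Int} (c : List Int) :
    c.foldl (bStep m t) none = none ↔ ∀ w ∈ c, PySem.Int.mod w m ≠ t := by
  induction c with
  | nil => simp
  | cons d ds ih =>
    by_cases hP : PySem.Int.mod d m = t
    · obtain ⟨w, hw, -⟩ := bFold_some (m := m) (t := t) ds d
      simp only [List.foldl_cons, bStep, if_pos hP]
      simp [hw, hP]
    · simp only [List.foldl_cons, bStep, if_neg hP]
      simp [ih, hP]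

lemma bFold_some_spec {m t : Int} {c : List Int} {w : Int}
    (h : c.foldl (bStep m t) none = some w) :
    w ∈ c ∧ PySem.Int.mod w m = t ∧ ∀ u ∈ c, PySem.Int.mod u m = t → w ≤ u := by
  induction c with
  | nil => simp at h
  | cons d ds ih =>
    by_cases hP : PySem.Int.mod d m = t
    · obtain ⟨w', hw', hwv, hwc, hmin⟩ := bFold_some ds d
      simp only [List.foldl_cons, bStep, if_pos hP] at h
      rw [hw'] at h
      injection h with h; subst h
      refine ⟨?_, ?_, ?_⟩
      · rcases hwc with rfl | ⟨hc, -⟩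
        · exact List.mem_cons_self
        · exact List.mem_cons_of_mem _ hc
      · rcases hwc with rfl | ⟨-, hPw⟩
        · exact hP
        · exact hPw
      · intro u hu hPu
        rcases List.mem_cons.1 hu with rfl | hu
        · exact hwv
        · exact hmin u hu hPu
    · simp only [List.foldl_cons, bStep, if_neg hP] at h
      obtain ⟨h1, h2, h3⟩ := ih h
      refine ⟨List.mem_cons_of_mem _ h1, h2, ?_⟩
      intro u hu hPu
      rcases List.mem_cons.1 hu with rfl | hu
      · exact absurd hPu hP
      · exact h3 u hu hPu

-- A's scan of a sorted list and B's running minimum agree when the lists have the same members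
lemma scan_eq_fold {m t : Int} {l c : List Int}
    (hs : l.Pairwise (· ≤ ·)) (hmem : ∀ z, z ∈ l ↔ z ∈ c) :
    fwScan m t l = c.foldl (bStep m t) none := by
  cases hA : fwScan m t l with
  | none =>
    cases hB : c.foldl (bStep m t) none with
    | none => rfl
    | some w =>
      obtain ⟨hw, hPw, -⟩ := bFold_some_spec hB
      exact absurd hPw (fwScan_eq_none.1 hA w ((hmem w).2 hw))
  | some v =>
    obtain ⟨hv, hPv, hmin⟩ := fwScan_eq_some hs hA
    cases hB : c.foldl (bStep m t) none with
    | none => exact absurd hPv ((bFold_none_iff c).1 hB v ((hmem v).1 hv))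
    | some w =>
      obtain ⟨hw, hPw, hmin'⟩ := bFold_some_spec hB
      have h1 := hmin w ((hmem w).2 hw) hPw
      have h2 := hmin' v ((hmem v).1 hv) hPv
      exact congrArg some (le_antisymm h1 h2)

-- B's nested product loop is the running minimum over the flattened product list
lemma bFold_outer (m t : Int) (dx L : List Int) (init : Option Int) :
    L.foldl (fun best a => dx.foldl (fun best b => bStep m t best (a * b)) best) init
      = (L.flatMap (fun a => dx.map (fun b => a * b))).foldl (bStep m t) init := by
  induction L generalizing init with
  | nil => rfl
  | cons a as ih =>
    simp only [List.foldl_cons, List.flatMap_cons, List.foldl_append, List.foldl_map]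
    rw [ih]

lemma bBest_eq (m t : Int) (dx : List Int) :
    bBest m t dx = (dx.flatMap (fun a => dx.map (fun b => a * b))).foldl (bStep m t) none := by
  unfold bBest
  rw [bFold_outer]

-- ---- B side: trial division enumerates exactly the divisors ----

lemma bDivisors_eq (n : Int) :
    bDivisors n =
      (PySem.List.pyRange 1 ((Nat.sqrt n.toNat : Int) + 1) 1).filter
        (fun i => decide (PySem.Int.mod n i = 0))
      ++ ((PySem.List.pyRange 1 ((Nat.sqrt n.toNat : Int) + 1) 1).filter
        (fun i => decide (PySem.Int.mod n i = 0))).map (fun i => PySem.Int.floordiv n i) := by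
  simp only [bDivisors]
  rw [PySem.List.foldl_congr_mem _ _
      (fun (st : List Int × List Int) i =>
        (if PySem.Int.mod n i = 0 then st.1 ++ [i] else st.1,
         if PySem.Int.mod n i = 0 then st.2 ++ [PySem.Int.floordiv n i] else st.2)) _
      (by intro acc x _; dsimp only; split <;> rfl)]
  rw [PySem.List.foldl_prod_mk
        (f := fun acc i => if PySem.Int.mod n i = 0 then acc ++ [i] else acc)
        (g := fun acc i => if PySem.Int.mod n i = 0 then acc ++ [PySem.Int.floordiv n i] else acc)]
  rw [PySem.List.foldl_append_ite_eq_filter, PySem.List.foldl_append_ite]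
  simp

lemma mem_bDivisors {n d : Int} (hn : 1 ≤ n) : d ∈ bDivisors n ↔ 1 ≤ d ∧ d ∣ n := by
  have hcast : ((n.toNat : Int)) = n := Int.toNat_of_nonneg (by omega)
  set s : Int := (Nat.sqrt n.toNat : Int) with hs
  have hs0 : 0 ≤ s := Int.natCast_nonneg _
  have hsq : n < (s + 1) * (s + 1) := by
    have h := Nat.lt_succ_sqrt n.toNat
    rw [Nat.succ_eq_add_one] at h
    rw [← hcast, hs]; exact_mod_cast h
  rw [bDivisors_eq]
  simp only [List.mem_append, List.mem_filter, List.mem_map, PySem.List.mem_pyRange_one,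
    decide_eq_true_eq, PySem.Int.mod_eq_zero_iff_dvd, ← hs]
  constructor
  · rintro (⟨⟨h1, h2⟩, hdvd⟩ | ⟨i, ⟨⟨hi1, hi2⟩, hidvd⟩, rfl⟩)
    · exact ⟨h1, hdvd⟩
    · obtain ⟨c, rfl⟩ := hidvd
      have hi0 : (0 : Int) < i := by omega
      rw [PySem.Int.floordiv_eq_ediv_of_pos hi0, Int.mul_ediv_cancel_left _ (by omega)]
      have hc : 1 ≤ c := by nlinarith
      exact ⟨hc, ⟨i, mul_comm i c⟩⟩
  · rintro ⟨hd1, hdvd⟩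
    by_cases hle : d ≤ s
    · exact Or.inl ⟨⟨hd1, by omega⟩, hdvd⟩
    · obtain ⟨c, rfl⟩ := hdvd
      have hd0 : (0 : Int) < d := by omega
      have hc1 : 1 ≤ c := by nlinarith
      have hcs : c ≤ s := by
        by_contra hcs
        have : (s + 1) * (s + 1) ≤ d * c := mul_le_mul (by omega) (by omega) (by omega) (by omega)
        omega
      refine Or.inr ⟨c, ⟨⟨hc1, by omega⟩, ⟨d, mul_comm d c⟩⟩, ?_⟩
      rw [PySem.Int.floordiv_eq_ediv_of_pos (by omega), Int.mul_ediv_cancel _ (by omega)]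

lemma mem_prodList {x z : Int} (hx : 1 ≤ x) :
    z ∈ (bDivisors x).flatMap (fun a => (bDivisors x).map (fun b => a * b)) ↔
      1 ≤ z ∧ z ∣ x * x := by
  simp only [List.mem_flatMap, List.mem_map]
  constructor
  · rintro ⟨a, ha, b, hb, rfl⟩
    obtain ⟨ha1, ha2⟩ := (mem_bDivisors hx).1 ha
    obtain ⟨hb1, hb2⟩ := (mem_bDivisors hx).1 hb
    exact ⟨one_le_mul_of_one_le_of_one_le ha1 hb1, mul_dvd_mul ha2 hb2⟩
  · rintro ⟨hz1, hz2⟩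
    obtain ⟨a, b, ha, hb, rfl⟩ := exists_dvd_and_dvd_of_dvd_mul hz2
    have hab : (1 : Int) ≤ a * b := hz1
    have ha0 : a ≠ 0 := by rintro rfl; simp at hab
    have hb0 : b ≠ 0 := by rintro rfl; simp at hab
    have ha1 : 0 < |a| := abs_pos.mpr ha0
    have hb1 : 0 < |b| := abs_pos.mpr hb0
    refine ⟨|a|, (mem_bDivisors hx).2 ⟨by omega, (abs_dvd _ _).2 ha⟩,
            |b|, (mem_bDivisors hx).2 ⟨by omega, (abs_dvd _ _).2 hb⟩, ?_⟩
    rw [← abs_mul]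
    exact abs_of_pos (by omega)

-- ---- A side, part 1: the trial-division factor loop returns a prime factorisation ----

def prodPE (l : List (Int × Int)) : Int := l.foldr (fun pe acc => pe.1 ^ pe.2.toNat * acc) 1
def prodPE2 (l : List (Int × Int)) : Int := l.foldr (fun pe acc => pe.1 ^ (2 * pe.2.toNat) * acc) 1

lemma prodPE_append (a b : List (Int × Int)) : prodPE (a ++ b) = prodPE a * prodPE b := by
  induction a with
  | nil => simp [prodPE]
  | cons x xs ih => simp only [List.cons_append, prodPE, List.foldr_cons] at *; rw [ih]; ring

lemma factorInner_spec (fuel : Nat) (n d e : Int) (hd : 2 ≤ d) (hn : 1 ≤ n)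
    (hf : n.toNat ≤ fuel) :
    ∃ (n' : Int) (j : Nat), factorInner fuel n d e = (n', e + (j : Int)) ∧
      1 ≤ n' ∧ n = n' * d ^ j ∧ ¬ d ∣ n' := by
  induction fuel generalizing n e with
  | zero => omega
  | succ f ih =>
    by_cases hdvd : PySem.Int.mod n d = 0
    · obtain ⟨c, rfl⟩ := (PySem.Int.mod_eq_zero_iff_dvd n d).1 hdvd
      have hc : 1 ≤ c := by nlinarith
      have hdc : PySem.Int.floordiv (d * c) d = c := by
        rw [PySem.Int.floordiv_eq_ediv_of_pos (by omega), Int.mul_ediv_cancel_left _ (by omega)]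
      have hlt : c < d * c := by nlinarith
      obtain ⟨n', j, heq, h1, h2, h3⟩ := ih c (e + 1) hc (by omega)
      refine ⟨n', j + 1, ?_, h1, ?_, h3⟩
      · show (if PySem.Int.mod (d * c) d = 0 then
            factorInner f (PySem.Int.floordiv (d * c) d) d (e + 1) else (d * c, e)) = _
        rw [if_pos hdvd, hdc, heq]
        congr 1
        push_cast; ring
      · rw [h2]; ring
    · refine ⟨n, 0, ?_, hn, by simp, fun hc => hdvd ((PySem.Int.mod_eq_zero_iff_dvd n d).2 hc)⟩
      show (if PySem.Int.mod n d = 0 then _ else (n, e)) = _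
      rw [if_neg hdvd]; simp

lemma prime_int_of_toNat {q : Int} (h0 : 0 ≤ q) (h : q.toNat.Prime) : Prime q := by
  rw [Int.prime_iff_natAbs_prime]
  have he : q.natAbs = q.toNat := by omega
  rwa [he]

lemma toNat_prime_of_prime {q : Int} (h0 : 0 ≤ q) (h : Prime q) : q.toNat.Prime := by
  rw [Int.prime_iff_natAbs_prime] at h
  have he : q.natAbs = q.toNat := by omega
  rwa [he] at h

lemma factorLoop_spec (fuel : Nat) : ∀ (n d : Int) (acc : List (Int × Int)),
    1 ≤ n → 2 ≤ d → (d = 2 ∨ d % 2 = 1) →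
    (∀ q : Int, Prime q → 0 ≤ q → q ∣ n → d ≤ q) →
    n.toNat + 2 ≤ fuel + d.toNat →
    ∃ (nf : Int) (l : List (Int × Int)),
      factorLoop fuel n d acc = (nf, acc ++ l) ∧ 1 ≤ nf ∧
      (∀ pe ∈ l, 2 ≤ pe.1 ∧ Prime pe.1 ∧ 1 ≤ pe.2) ∧
      prodPE l * nf = n ∧
      (∀ q : Int, Prime q → 0 ≤ q → q ∣ nf → nf < q * q) := by
  induction fuel with
  | zero =>
    intro n d acc hn hd hodd hinv hf
    refine ⟨n, [], by simp [factorLoop], hn, by simp, by simp [prodPE], ?_⟩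
    intro q hq hq0 hqd
    have hdq := hinv q hq hq0 hqd
    have hqq : q ≤ q * q := le_mul_of_one_le_left (by omega) (by omega)
    have hle := Int.le_of_dvd (by omega) hqd
    omega
  | succ f ih =>
    intro n d acc hn hd hodd hinv hf
    by_cases hguard : d * d ≤ n
    · have hdprime : PySem.Int.mod n d = 0 → Prime d := by
        intro hdvd
        have hdvd' : d ∣ n := (PySem.Int.mod_eq_zero_iff_dvd n d).1 hdvd
        have h2 : d.toNat ≠ 1 := by omega
        have hq : (d.toNat.minFac : Int) ∣ n := by
          refine dvd_trans ?_ hdvd'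
          have h := Int.natCast_dvd_natCast.2 (Nat.minFac_dvd d.toNat)
          rwa [Int.toNat_of_nonneg (by omega)] at h
        have hprime := Nat.minFac_prime h2
        have hpi : Prime ((d.toNat.minFac : Int)) :=
          prime_int_of_toNat (by positivity) (by simpa using hprime)
        have hge := hinv _ hpi (by positivity) hq
        have hle : d.toNat.minFac ≤ d.toNat := Nat.minFac_le (by omega)
        have heq : (d.toNat.minFac : Int) = d := by omega
        rwa [heq] at hpi
      have hodd' : d + (if d = 2 then 1 else 2) = 2 ∨ (d + (if d = 2 then 1 else 2)) % 2 = 1 := by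
        rcases hodd with h2 | hoddd
        · subst h2; norm_num
        · right; split <;> omega
      have hd' : 2 ≤ d + (if d = 2 then 1 else 2) := by split <;> omega
      have hdd : d + 1 ≤ d + (if d = 2 then 1 else 2) := by split <;> omega
      by_cases hdvd : PySem.Int.mod n d = 0
      · obtain ⟨n', j, heq, h1, h2, h3⟩ := factorInner_spec n.toNat n d 0 hd hn (le_refl _)
        have hdp := hdprime hdvd
        have hj1 : 1 ≤ j := by
          rcases Nat.eq_zero_or_pos j with rfl | h
          · exfalso
            rw [pow_zero, mul_one] at h2
            rw [h2] at hdvd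
            exact h3 ((PySem.Int.mod_eq_zero_iff_dvd n' d).1 hdvd)
          · exact h
        have hdj : d ≤ d ^ j := le_self_pow₀ (by omega) (by omega)
        have hlt : n' < n := by nlinarith
        have hinv' : ∀ q : Int, Prime q → 0 ≤ q → q ∣ n' → d + (if d = 2 then 1 else 2) ≤ q := by
          intro q hq hq0 hqd
          have hqn : q ∣ n := h2 ▸ hqd.mul_right _
          have hge := hinv q hq hq0 hqn
          have hne : q ≠ d := by rintro rfl; exact h3 hqd
          rcases hodd with h2d | hoddd
          · subst h2d; norm_num; omega
          · have hne1 : q ≠ d + 1 := by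
              rintro rfl
              have hp := toNat_prime_of_prime hq0 hq
              have h2q' : 2 ∣ (d + 1).toNat := by omega
              have := (Nat.prime_dvd_prime_iff_eq Nat.prime_two hp).1 h2q'
              omega
            rw [if_neg (by omega)]; omega
        obtain ⟨nf, l', heq', hnf1, hl', hprod', hbig'⟩ :=
          ih n' (d + (if d = 2 then 1 else 2)) (acc ++ [(d, 0 + (j : Int))]) h1 hd' hodd' hinv'
            (by omega)
        refine ⟨nf, (d, 0 + (j : Int)) :: l', ?_, hnf1, ?_, ?_, hbig'⟩
        · show (if d * d ≤ n then
              if PySem.Int.mod n d = 0 then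
                let r := factorInner n.toNat n d 0
                factorLoop f r.1 (d + (if d = 2 then 1 else 2)) (acc ++ [(d, r.2)])
              else factorLoop f n (d + (if d = 2 then 1 else 2)) acc
            else (n, acc)) = (nf, acc ++ ((d, 0 + (j : Int)) :: l'))
          rw [if_pos hguard, if_pos hdvd]
          simp only [heq]
          rw [heq']
          simp
        · intro pe hpe
          rcases List.mem_cons.1 hpe with h | h
          · rw [h]
            refine ⟨hd, hdp, ?_⟩
            show (1 : Int) ≤ 0 + (j : Int)
            omega
          · exact hl' pe h
        · have hto : ((0 : Int) + (j : Int)).toNat = j := by omega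
          simp only [prodPE, List.foldr_cons] at hprod' ⊢
          rw [hto, mul_assoc, hprod', h2]
          ring
      · have hinv' : ∀ q : Int, Prime q → 0 ≤ q → q ∣ n → d + (if d = 2 then 1 else 2) ≤ q := by
          intro q hq hq0 hqd
          have hge := hinv q hq hq0 hqd
          have hne : q ≠ d := by
            rintro rfl
            exact hdvd ((PySem.Int.mod_eq_zero_iff_dvd n q).2 hqd)
          rcases hodd with h2d | hoddd
          · subst h2d; norm_num; omega
          · have hne1 : q ≠ d + 1 := by
              rintro rfl
              have hp := toNat_prime_of_prime hq0 hq
              have h2q' : 2 ∣ (d + 1).toNat := by omega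
              have := (Nat.prime_dvd_prime_iff_eq Nat.prime_two hp).1 h2q'
              omega
            rw [if_neg (by omega)]; omega
        obtain ⟨nf, l', heq', hnf1, hl', hprod', hbig'⟩ :=
          ih n (d + (if d = 2 then 1 else 2)) acc hn hd' hodd' hinv' (by omega)
        refine ⟨nf, l', ?_, hnf1, hl', hprod', hbig'⟩
        show (if d * d ≤ n then
            if PySem.Int.mod n d = 0 then
              let r := factorInner n.toNat n d 0
              factorLoop f r.1 (d + (if d = 2 then 1 else 2)) (acc ++ [(d, r.2)])
            else factorLoop f n (d + (if d = 2 then 1 else 2)) acc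
          else (n, acc)) = (nf, acc ++ l')
        rw [if_pos hguard, if_neg hdvd, heq']
    · refine ⟨n, [], ?_, hn, by simp, by simp [prodPE], ?_⟩
      · show (if d * d ≤ n then
            if PySem.Int.mod n d = 0 then
              let r := factorInner n.toNat n d 0
              factorLoop f r.1 (d + (if d = 2 then 1 else 2)) (acc ++ [(d, r.2)])
            else factorLoop f n (d + (if d = 2 then 1 else 2)) acc
          else (n, acc)) = (n, acc ++ [])
        rw [if_neg hguard, List.append_nil]
      · intro q hq hq0 hqd
        have hdq := hinv q hq hq0 hqd
        have hqq : d * d ≤ q * q := mul_le_mul hdq hdq (by omega) (by omega)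
        omega

lemma factor_spec {n : Int} (hn : 2 ≤ n) :
    (∀ pe ∈ factor n, 2 ≤ pe.1 ∧ Prime pe.1 ∧ 1 ≤ pe.2) ∧ prodPE (factor n) = n := by
  have hinv : ∀ q : Int, Prime q → 0 ≤ q → q ∣ n → 2 ≤ q := by
    intro q hq hq0 _
    have h := (toNat_prime_of_prime hq0 hq).two_le
    omega
  obtain ⟨nf, l, heq, h1, hl, hprod, hbig⟩ :=
    factorLoop_spec (n.toNat + 1) n 2 [] (by omega) (by omega) (Or.inl rfl) hinv (by omega)
  have hfac : factor n = if nf > 1 then l ++ [(nf, 1)] else l := by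
    unfold factor
    rw [if_neg (by omega : ¬ n ≤ 1)]
    simp only [heq]
    simp
  by_cases hnf : 1 < nf
  · have hnfp : Prime nf := by
      by_contra hnp
      have hnple : ¬ nf.toNat.Prime := fun h => hnp (prime_int_of_toNat (by omega) h)
      have hmf := Nat.minFac_prime (by omega : nf.toNat ≠ 1)
      have hmfd : ((nf.toNat.minFac : Int)) ∣ nf := by
        have h := Int.natCast_dvd_natCast.2 (Nat.minFac_dvd nf.toNat)
        rwa [Int.toNat_of_nonneg (by omega)] at h
      have hbig' := hbig _ (prime_int_of_toNat (by positivity) (by simpa using hmf))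
        (by positivity) hmfd
      have hsq := Nat.minFac_sq_le_self (by omega : 0 < nf.toNat) hnple
      rw [pow_two] at hsq
      have hcast : ((nf.toNat.minFac * nf.toNat.minFac : Nat) : Int) ≤ ((nf.toNat : Nat) : Int) :=
        Int.ofNat_le.2 hsq
      push_cast at hcast
      omega
    rw [hfac, if_pos hnf]
    refine ⟨?_, ?_⟩
    · intro pe hpe
      rcases List.mem_append.1 hpe with h | h
      · exact hl pe h
      · simp only [List.mem_singleton] at h
        rw [h]
        exact ⟨by omega, hnfp, by norm_num⟩
    · rw [prodPE_append]
      have hone : prodPE [(nf, 1)] = nf := by simp [prodPE]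
      rw [hone, hprod]
  · have h1' : nf = 1 := by omega
    rw [hfac, if_neg hnf]
    refine ⟨hl, ?_⟩
    rw [← hprod, h1', mul_one]

-- ---- A side, part 2: the nested expansion generates exactly the divisors of n² ----

lemma dsqInner_fold {α : Type} (p d : Int) (L : List α) (nd : List Int) (c : Int) :
    L.foldl (fun (st : List Int × Int) _ => (st.1 ++ [d * st.2], st.2 * p)) (nd, c) =
      (nd ++ (List.range L.length).map (fun i => d * (c * p ^ i)), c * p ^ L.length) := by
  induction L generalizing nd c with
  | nil => simp
  | cons x xs ih =>
    rw [List.foldl_cons, ih]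
    simp only [Prod.mk.injEq, List.length_cons]
    constructor
    · rw [List.range_succ_eq_map, List.map_cons, List.map_map, pow_zero, mul_one,
        List.append_assoc]
      congr 1
      rw [List.singleton_append]
      congr 1
      apply List.map_congr_left
      intro i _
      simp only [Function.comp_apply, pow_succ]
      ring
    · rw [pow_succ]; ring

lemma dsqExpand_eq (p e : Int) (nd : List Int) (d : Int) :
    dsqExpand p e nd d = nd ++ (List.range (2 * e + 1).toNat).map (fun i => d * p ^ i) := by
  unfold dsqExpand
  rw [dsqInner_fold]
  have hlen : (PySem.List.pyRange 0 (2 * e + 1) 1).length = (2 * e + 1).toNat := by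
    rw [PySem.List.length_pyRange_one]; congr 1; omega
  rw [hlen]
  simp

lemma genStep_eq (p e : Int) (divs : List Int) :
    divs.foldl (dsqExpand p e) [] =
      divs.flatMap (fun d => (List.range (2 * e + 1).toNat).map (fun i => d * p ^ i)) := by
  rw [PySem.List.foldl_congr_mem _ _
      (fun nd d => nd ++ (List.range (2 * e + 1).toNat).map (fun i => d * p ^ i)) _
      (by intro acc d _; exact dsqExpand_eq p e acc d)]
  rw [PySem.List.foldl_append_eq_flatMap]
  simp

lemma genFold_mem (l : List (Int × Int))
    (hl : ∀ pe ∈ l, 2 ≤ pe.1 ∧ Prime pe.1 ∧ 0 ≤ pe.2) :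
    ∀ (divs : List Int) (z : Int),
      (z ∈ l.foldl (fun divs pe => divs.foldl (dsqExpand pe.1 pe.2) []) divs ↔
        ∃ d ∈ divs, ∃ m : Int, m ∣ prodPE2 l ∧ 1 ≤ m ∧ z = d * m) := by
  induction l with
  | nil =>
    intro divs z
    simp only [List.foldl_nil, prodPE2, List.foldr_nil]
    constructor
    · intro hz
      exact ⟨z, hz, 1, dvd_refl 1, le_refl 1, (mul_one z).symm⟩
    · rintro ⟨d, hd, m, hm1, hm2, rfl⟩
      have h1 : m = 1 := le_antisymm (Int.le_of_dvd one_pos hm1) hm2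
      rw [h1, mul_one]
      exact hd
  | cons pe l' ih =>
    intro divs z
    obtain ⟨hpe2, hpep, hpee⟩ := hl pe List.mem_cons_self
    have hl' : ∀ q ∈ l', 2 ≤ q.1 ∧ Prime q.1 ∧ 0 ≤ q.2 :=
      fun q hq => hl q (List.mem_cons_of_mem _ hq)
    have htoNat : (2 * pe.2 + 1).toNat = 2 * pe.2.toNat + 1 := by omega
    rw [List.foldl_cons, genStep_eq, ih hl']
    have hP2 : prodPE2 (pe :: l') = pe.1 ^ (2 * pe.2.toNat) * prodPE2 l' := by
      simp [prodPE2]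
    rw [hP2]
    constructor
    · rintro ⟨d', hd', m', hm'1, hm'2, rfl⟩
      rw [List.mem_flatMap] at hd'
      obtain ⟨d, hd, hd'mem⟩ := hd'
      rw [List.mem_map] at hd'mem
      obtain ⟨i, hi, rfl⟩ := hd'mem
      rw [List.mem_range, htoNat] at hi
      refine ⟨d, hd, pe.1 ^ i * m', ?_, ?_, by ring⟩
      · exact mul_dvd_mul (pow_dvd_pow pe.1 (by omega)) hm'1
      · have hppos : (1 : Int) ≤ pe.1 ^ i := one_le_pow₀ (by omega)
        nlinarith
    · rintro ⟨d, hd, m, hm1, hm2, rfl⟩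
      obtain ⟨a, b, ha, hb, hab⟩ := exists_dvd_and_dvd_of_dvd_mul hm1
      obtain ⟨i, hi, hassoc⟩ := (dvd_prime_pow hpep _).1 ha
      have hppos : (0 : Int) < pe.1 ^ i := pow_pos (by omega) i
      have hcases := Int.associated_iff.1 hassoc
      -- b' = ±b with m = pe.1 ^ i * b'
      obtain ⟨b', hb', hmb⟩ : ∃ b', b' ∣ prodPE2 l' ∧ m = pe.1 ^ i * b' := by
        rcases hcases with h | h
        · exact ⟨b, hb, by rw [hab, h]⟩
        · exact ⟨-b, (neg_dvd).2 hb, by rw [hab, h]; ring⟩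
      have hb'1 : 1 ≤ b' := by nlinarith
      refine ⟨d * pe.1 ^ i, ?_, b', hb', hb'1, by rw [hmb]; ring⟩
      rw [List.mem_flatMap]
      refine ⟨d, hd, ?_⟩
      rw [List.mem_map]
      exact ⟨i, by rw [List.mem_range, htoNat]; omega, rfl⟩

lemma prodPE2_eq_sq (l : List (Int × Int)) : prodPE2 l = prodPE l * prodPE l := by
  induction l with
  | nil => simp [prodPE, prodPE2]
  | cons pe l' ih =>
    simp only [prodPE, prodPE2, List.foldr_cons] at *
    rw [ih, two_mul, pow_add]
    ring

lemma mem_divisors_of_square {x z : Int} (hx : 1 ≤ x) :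
    z ∈ divisors_of_square x ↔ 1 ≤ z ∧ z ∣ x * x := by
  unfold divisors_of_square
  rw [PySem.List.mem_sorted]
  by_cases hx1 : x = 1
  · subst hx1
    have hf1 : factor 1 = [] := by norm_num [factor]
    rw [hf1]
    simp only [List.foldl_nil, List.mem_singleton]
    constructor
    · rintro rfl; exact ⟨le_refl 1, by norm_num⟩
    · rintro ⟨h1, h2⟩
      exact le_antisymm (Int.le_of_dvd one_pos (by simpa using h2)) h1
  · have hx2 : 2 ≤ x := by omega
    obtain ⟨hfl, hfp⟩ := factor_spec hx2
    rw [genFold_mem (factor x)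
      (fun pe hpe => ⟨(hfl pe hpe).1, (hfl pe hpe).2.1, by have := (hfl pe hpe).2.2; omega⟩) [1] z]
    have hP : prodPE2 (factor x) = x * x := by rw [prodPE2_eq_sq, hfp]
    rw [hP]
    constructor
    · rintro ⟨d, hd, m, hm1, hm2, rfl⟩
      rw [List.mem_singleton] at hd
      subst hd
      rw [one_mul]
      exact ⟨hm2, hm1⟩
    · rintro ⟨hz1, hz2⟩
      exact ⟨1, List.mem_singleton_self 1, z, hz2, hz1, (one_mul z).symm⟩

lemma sorted_divisors_of_square (x : Int) :
    (divisors_of_square x).Pairwise (· ≤ ·) := by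
  unfold divisors_of_square
  exact PySem.List.sorted_pairwise _ _

-- ---- assembly: the two witness searches and the two outer loops agree ----

lemma witness_eq {p k : Int} (hp : -3 ≤ p) (hk : 0 ≤ k) :
    find_witness p k = bWitness p k := by
  simp only [find_witness, bWitness]
  by_cases h4 : PySem.Int.mod (p + (4 * k + 3)) 4 = 0
  · rw [if_neg (show ¬ (PySem.Int.mod (p + (4 * k + 3)) 4 ≠ 0) from by simp only [ne_eq, not_not]; exact h4),
      if_neg (show ¬ (PySem.Int.mod (p + (4 * k + 3)) 4 ≠ 0) from by simp only [ne_eq, not_not]; exact h4)]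
    set x := PySem.Int.floordiv (p + (4 * k + 3)) 4 with hxdef
    have hx0 : 0 ≤ x := by
      rw [hxdef, PySem.Int.floordiv_eq_ediv_of_pos (show (0:Int) < 4 from by omega)]
      exact Int.ediv_nonneg (by omega) (by omega)
    by_cases hg : ((Int.gcd x (4 * k + 3) : Int)) = 1
    · rw [if_neg (show ¬ ((Int.gcd x (4 * k + 3) : Int) > 1) from by omega),
        if_neg (show ¬ ((Int.gcd x (4 * k + 3) : Int) ≠ 1) from by omega)]
      have hxne : x ≠ 0 := by
        rintro h0
        rw [h0] at hg
        rw [show Int.gcd 0 (4 * k + 3) = (4 * k + 3).natAbs from by simp [Int.gcd]] at hg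
        omega
      have hx1 : 1 ≤ x := by omega
      have hcore : fwScan (4 * k + 3) (PySem.Int.mod (-x) (4 * k + 3)) (divisors_of_square x)
          = bBest (4 * k + 3) (PySem.Int.mod (-x) (4 * k + 3)) (bDivisors x) := by
        rw [bBest_eq]
        exact scan_eq_fold (sorted_divisors_of_square x)
          (fun z => (mem_divisors_of_square hx1).trans (mem_prodList hx1).symm)
      rw [hcore]
    · have hg0 : 0 < Int.gcd x (4 * k + 3) := by
        rcases Nat.eq_zero_or_pos (Int.gcd x (4 * k + 3)) with h0 | h
        · exfalso
          rw [Int.gcd_eq_zero_iff] at h0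
          omega
        · exact h
      rw [if_pos (show (Int.gcd x (4 * k + 3) : Int) > 1 from by omega),
        if_pos (show (Int.gcd x (4 * k + 3) : Int) ≠ 1 from by omega)]
  · rw [if_pos (show PySem.Int.mod (p + (4 * k + 3)) 4 ≠ 0 from h4),
      if_pos (show PySem.Int.mod (p + (4 * k + 3)) 4 ≠ 0 from h4)]

lemma loops_eq (p r s t : Int) (ks : List Int)
    (h : ∀ k ∈ ks, find_witness p k = bWitness p k) :
    vpLoop p r s t ks = bLoop p r s t ks := by
  induction ks with
  | nil => rfl
  | cons k ks ih =>
    have hk := h k List.mem_cons_self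
    simp only [vpLoop, bLoop, hk]
    cases bWitness p k with
    | none => exact ih (fun k' hk' => h k' (List.mem_cons_of_mem _ hk'))
    | some q => rfl

lemma vpLoop_none (p r s t : Int) (ks : List Int)
    (h : ∀ k ∈ ks, find_witness p k = none) : vpLoop p r s t ks = none := by
  induction ks with
  | nil => rfl
  | cons k ks ih =>
    simp only [vpLoop, h k List.mem_cons_self]
    exact ih (fun k' hk' => h k' (List.mem_cons_of_mem _ hk'))

lemma bLoop_none (p r s t : Int) (ks : List Int)
    (h : ∀ k ∈ ks, bWitness p k = none) : bLoop p r s t ks = none := by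
  induction ks with
  | nil => rfl
  | cons k ks ih =>
    simp only [bLoop, h k List.mem_cons_self]
    exact ih (fun k' hk' => h k' (List.mem_cons_of_mem _ hk'))

lemma mod4_guard {p k : Int} (hmod : PySem.Int.mod p 4 ≠ 1) :
    PySem.Int.mod (p + (4 * k + 3)) 4 ≠ 0 := by
  rw [PySem.Int.mod_eq_emod_of_pos (by omega : (0:Int) < 4)] at hmod ⊢
  omega

lemma K_nonneg : ∀ k ∈ K_COMPLETE, 0 ≤ k := by decide

-- ===== VERDICT (by name: the statement is the Claim_ definition above) =====
theorem verify_prime_spec : Claim_equal_verify_prime := by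
  intro p _ hpre
  unfold Spec_verify_prime verify_prime verify_prime_alt
  by_cases hp : -3 ≤ p
  · exact loops_eq _ _ _ _ _ (fun k hk => witness_eq hp (K_nonneg k hk))
  · have hmod : PySem.Int.mod p 4 ≠ 1 := hpre.resolve_left hp
    rw [vpLoop_none _ _ _ _ _ (fun k _ => by
        unfold find_witness
        rw [if_pos (by simpa using mod4_guard (k := k) hmod)]),
      bLoop_none _ _ _ _ _ (fun k _ => by
        unfold bWitness
        rw [if_pos (by simpa using mod4_guard (k := k) hmod)])]
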